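-- pv_equiv track=rewrite | github.com/MichaelHorak/CS50 | CS50P/Problem Set 2/plates.py | no_periods
-- ===== SOURCE A (Python) =====
-- def no_periods(x):
--     forbid_chars = ['.', ' ', '?', ',', '!', '\"', '\'', '–', '[', ']', '(', ')', '–', '—', '...', ':', ';']
--     nplist = []
--     # -No periods, spaces, or punctuation marks are allowed.
--     for i in range(0, len(x)):
--         if x[i] in forbid_chars:
--             nplist.append('False')
--         else:
--             nplist.append('True')
--     if 'False' in str(nplist):
--         return False
--     else:
--         return True
-- ===== SOURCE B (Python) =====
-- def no_periods(x):
--     forbidden = {'.', ' ', '?', ',', '!', '"', "'", '\u2013', '[', ']', '(', ')', '\u2014', ':', ';'}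
--     return set(x).isdisjoint(forbidden)
-- ===== Notes on version B (the rewrite author's own statement) =====
-- stated objective: faster
-- what changed: Replaces the per-index loop that accumulates truth-word strings and then substring-searches the list's repr with building a set of the input's distinct characters and one disjointness check against a set of forbidden characters (the dead multi-char ellipsis entry and the duplicate dash, which can never equal a single character, are dropped).
import Mathlib
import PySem

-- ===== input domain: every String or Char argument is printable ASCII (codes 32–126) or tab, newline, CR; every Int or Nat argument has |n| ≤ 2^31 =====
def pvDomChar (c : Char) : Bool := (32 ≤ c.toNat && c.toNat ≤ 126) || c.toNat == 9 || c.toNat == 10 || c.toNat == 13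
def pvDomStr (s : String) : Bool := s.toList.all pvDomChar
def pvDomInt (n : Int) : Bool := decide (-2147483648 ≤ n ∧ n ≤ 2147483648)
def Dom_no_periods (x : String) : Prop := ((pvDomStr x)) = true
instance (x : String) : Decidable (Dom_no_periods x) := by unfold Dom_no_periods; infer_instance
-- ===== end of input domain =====

-- B replaces A's per-index loop accumulating 'True'/'False' strings (then a substring test on the
-- list's repr) by one disjointness check between set(x) and a set of forbidden characters (idiomatic).

-- ===== PORT A =====
-- forbid_chars verbatim (incl. the duplicate '–' and the multi-char '...')
def forbidCharsA : List String :=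
  [".", " ", "?", ",", "!", "\"", "'", "–", "[", "]", "(", ")", "–", "—", "...", ":", ";"]

-- hand port of str(nplist): Python's repr of a list of strings, exact for the quote-free,
-- escape-free 'True'/'False' entries this list holds (tail entries prefixed by ", ")
def pyReprTail (l : List (List Char)) : List Char :=
  match l with
  | [] => []
  | a :: t => ',' :: ' ' :: '\'' :: (a ++ '\'' :: pyReprTail t)

def pyReprStrList (l : List (List Char)) : List Char :=
  match l with
  | [] => ['[', ']']
  | a :: t => '[' :: '\'' :: (a ++ '\'' :: (pyReprTail t ++ [']']))

def no_periods (x : String) : Bool :=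
  let nplist : List (List Char) :=
    (PySem.List.pyRange 0 (PySem.Str.len x) 1).foldl
      (fun np i =>
        if forbidCharsA.contains (String.ofList [PySem.List.pyGetD x.toList i 'a']) then
          np ++ ["False".toList]
        else
          np ++ ["True".toList]) []
  if PySem.Chars.isIn "False".toList (pyReprStrList nplist) then false else true

-- ===== PORT B =====
def forbiddenB : PySem.Set Char :=
  PySem.Set.ofList ['.', ' ', '?', ',', '!', '"', '\'', '–', '[', ']', '(', ')', '—', ':', ';']

def no_periods_alt (x : String) : Bool :=
  PySem.Set.isdisjoint (PySem.Set.ofList x.toList) forbiddenB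

-- ===== PRECONDITION & SPEC =====
def Spec_no_periods (x : String) (out : Bool) : Prop := out = no_periods_alt x
instance (x : String) (out : Bool) : Decidable (Spec_no_periods x out) := by unfold Spec_no_periods; infer_instance

-- ===== CLAIM (what is proved, stated in full; the proofs are below) =====
def Claim_equal_no_periods : Prop := ∀ (x : String), Dom_no_periods x → Spec_no_periods x (no_periods x)

-- ===== LEMMAS AND PROOFS =====

-- a single character is in A's forbidden list iff it is one of B's forbidden characters
theorem forbid_char_iff (c : Char) :
    forbidCharsA.contains (String.ofList [c]) = true ↔
      c ∈ (['.', ' ', '?', ',', '!', '"', '\'', '–', '[', ']', '(', ')', '—', ':', ';'] : List Char) := by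
  simp only [forbidCharsA, List.contains_eq_mem, List.mem_cons, decide_eq_true_eq,
    String.ext_iff]
  simp only [String.toList_ofList]
  constructor
  · intro h; rcases h with h|h|h|h|h|h|h|h|h|h|h|h|h|h|h|h <;> simp_all
  · intro h; rcases h with h|h|h|h|h|h|h|h|h|h|h|h|h|h|h <;> simp_all

-- A's index loop builds the per-character map
theorem nplist_eq (x : String) :
    (PySem.List.pyRange 0 (PySem.Str.len x) 1).foldl
      (fun np i =>
        if forbidCharsA.contains (String.ofList [PySem.List.pyGetD x.toList i 'a']) then
          np ++ ["False".toList]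
        else
          np ++ ["True".toList]) []
    = x.toList.map (fun c => if forbidCharsA.contains (String.ofList [c]) then "False".toList else "True".toList) := by
  have hfun : (fun (np : List (List Char)) (i : Int) =>
        if forbidCharsA.contains (String.ofList [PySem.List.pyGetD x.toList i 'a']) then
          np ++ ["False".toList]
        else
          np ++ ["True".toList])
      = fun np i => np ++ [if forbidCharsA.contains (String.ofList [PySem.List.pyGetD x.toList i 'a']) then "False".toList else "True".toList] := by
    funext np i; split <;> rfl
  rw [hfun, PySem.Str.len_eq, PySem.List.foldl_pyRange_zero_pyGetD' x.toList 'a'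
      (fun acc c => acc ++ [if forbidCharsA.contains (String.ofList [c]) then "False".toList else "True".toList]) []]
  rw [PySem.List.foldl_append_singleton_eq_map]
  simp

theorem F_mem_tail (t : List (List Char))
    (h : ∀ s ∈ t, s = "True".toList ∨ s = "False".toList)
    (hF : 'F' ∈ pyReprTail t) : "False".toList ∈ t := by
  induction t with
  | nil => simp [pyReprTail] at hF
  | cons a t ih =>
    simp only [pyReprTail, List.mem_cons, List.mem_append] at hF
    rcases hF with h1 | h1 | h1 | h1 | h1 | h1
    · exact absurd h1 (by decide)
    · exact absurd h1 (by decide)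
    · exact absurd h1 (by decide)
    · rcases h a (List.mem_cons_self) with rfl | rfl
      · exact absurd h1 (by decide)
      · exact List.mem_cons_self
    · exact absurd h1 (by decide)
    · exact List.mem_cons_of_mem _ (ih (fun s hs => h s (List.mem_cons_of_mem _ hs)) h1)

theorem F_mem_repr (l : List (List Char))
    (h : ∀ s ∈ l, s = "True".toList ∨ s = "False".toList)
    (hF : 'F' ∈ pyReprStrList l) : "False".toList ∈ l := by
  cases l with
  | nil => simp [pyReprStrList] at hF
  | cons a t =>
    simp only [pyReprStrList, List.mem_cons, List.mem_append] at hF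
    rcases hF with h1 | h1 | h1 | h1 | h1 | h1
    · exact absurd h1 (by decide)
    · exact absurd h1 (by decide)
    · rcases h a (List.mem_cons_self) with rfl | rfl
      · exact absurd h1 (by decide)
      · exact List.mem_cons_self
    · exact absurd h1 (by decide)
    · exact List.mem_cons_of_mem _
        (F_mem_tail t (fun s hs => h s (List.mem_cons_of_mem _ hs)) h1)
    · exact absurd h1 (by decide)

theorem infix_tail (t : List (List Char)) (ht : "False".toList ∈ t) :
    "False".toList <:+: pyReprTail t := by
  induction t with
  | nil => simp at ht
  | cons a t ih =>
    rcases List.mem_cons.mp ht with rfl | hmem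
    · exact ⟨[',', ' ', '\''], '\'' :: pyReprTail t, by simp [pyReprTail]⟩
    · exact (ih hmem).trans ⟨',' :: ' ' :: '\'' :: (a ++ ['\'']), [], by simp [pyReprTail]⟩

theorem infix_repr (l : List (List Char)) (hl : "False".toList ∈ l) :
    "False".toList <:+: pyReprStrList l := by
  cases l with
  | nil => simp at hl
  | cons a t =>
    rcases List.mem_cons.mp hl with rfl | hmem
    · exact ⟨['[', '\''], '\'' :: (pyReprTail t ++ [']']), by simp [pyReprStrList]⟩
    · exact (infix_tail t hmem).trans
        ⟨'[' :: '\'' :: (a ++ ['\'']), [']'], by simp [pyReprStrList]⟩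

theorem isIn_repr (l : List (List Char))
    (h : ∀ s ∈ l, s = "True".toList ∨ s = "False".toList) :
    PySem.Chars.isIn "False".toList (pyReprStrList l) = true ↔ "False".toList ∈ l := by
  rw [PySem.Chars.isIn_iff_infix]
  constructor
  · intro hin
    rcases hin with ⟨u, v, huv⟩
    apply F_mem_repr l h
    rw [← huv]; simp
  · exact infix_repr l

-- ===== VERDICT (by name: the statement is the Claim_ definition above) =====
theorem no_periods_spec : Claim_equal_no_periods := by
  intro x _
  unfold Spec_no_periods no_periods no_periods_alt
  simp only [nplist_eq]
  set M := x.toList.map (fun c => if forbidCharsA.contains (String.ofList [c]) then "False".toList else "True".toList) with hM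
  have hall : ∀ s ∈ M, s = "True".toList ∨ s = "False".toList := by
    intro s hs
    rw [hM] at hs
    simp only [List.mem_map] at hs
    rcases hs with ⟨c, _, rfl⟩
    split
    · right; rfl
    · left; rfl
  have hmemF : "False".toList ∈ M ↔ ∃ c ∈ x.toList, forbidCharsA.contains (String.ofList [c]) = true := by
    rw [hM]
    simp only [List.mem_map]
    constructor
    · rintro ⟨c, hc, hcf⟩
      refine ⟨c, hc, ?_⟩
      by_contra hn
      rw [if_neg hn] at hcf
      exact absurd hcf (by decide)
    · rintro ⟨c, hc, hcf⟩
      exact ⟨c, hc, by rw [if_pos hcf]⟩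
  rw [Bool.eq_iff_iff, PySem.Set.isdisjoint_iff]
  constructor
  · intro hA c hc
    have hisIn : PySem.Chars.isIn "False".toList (pyReprStrList M) = false := by
      by_contra hn
      rw [Bool.not_eq_false] at hn
      rw [if_pos hn] at hA
      exact absurd hA (by decide)
    intro hcf
    have hcx : c ∈ x.toList := (PySem.Set.mem_ofList _ _).mp hc
    have hcl : c ∈ (['.', ' ', '?', ',', '!', '"', '\'', '–', '[', ']', '(', ')', '—', ':', ';'] : List Char) :=
      (PySem.Set.mem_ofList _ _).mp hcf
    have : "False".toList ∈ M := hmemF.mpr ⟨c, hcx, (forbid_char_iff c).mpr hcl⟩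
    rw [(isIn_repr M hall).mpr this] at hisIn
    exact absurd hisIn (by decide)
  · intro hB
    rw [if_neg]
    intro hn
    rcases hmemF.mp ((isIn_repr M hall).mp hn) with ⟨c, hcx, hcf⟩
    exact hB c ((PySem.Set.mem_ofList _ _).mpr hcx)
      ((PySem.Set.mem_ofList _ _).mpr ((forbid_char_iff c).mp hcf))
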